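-- pv_equiv track=rewrite | github.com/coresnprogrammer/ISWEOLEOS | integration.py | erase_slash_txt
-- ===== SOURCE A (Python) =====
-- def erase_slash_txt(string):
--     index = 0
--     counter = 0
--     while (counter < 10):
--         index = string.find('/')
--         if (index == -1):
--             break
--         string = string[index + 1 :]
--         counter += 1
--     return(string[: -4])
-- ===== SOURCE B (Python) =====
-- def erase_slash_txt(string):
--     slashes = [i for i, c in enumerate(string) if c == '/']
--     if slashes:
--         cut = slashes[min(len(slashes), 10) - 1] + 1
--     else:
--         cut = 0
--     return string[cut:][:-4]
-- ===== Notes on version B (the rewrite author's own statement) =====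
-- stated objective: alternative
-- what changed: Instead of A's capped while loop of find-and-reslice, B materialises the list of all slash positions in one comprehension and computes the cut point arithmetically as the position after the min(count,10)-th slash, then slices once.
import Mathlib
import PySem

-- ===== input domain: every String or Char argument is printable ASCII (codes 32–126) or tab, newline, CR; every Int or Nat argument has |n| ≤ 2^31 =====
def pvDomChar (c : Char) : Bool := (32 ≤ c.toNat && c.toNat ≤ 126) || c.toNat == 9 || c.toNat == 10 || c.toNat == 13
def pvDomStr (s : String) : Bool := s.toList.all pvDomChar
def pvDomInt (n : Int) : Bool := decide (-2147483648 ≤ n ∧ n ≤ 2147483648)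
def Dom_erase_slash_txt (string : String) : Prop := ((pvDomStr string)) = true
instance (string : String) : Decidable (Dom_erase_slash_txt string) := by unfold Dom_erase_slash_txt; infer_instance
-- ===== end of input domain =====

-- B replaces A's capped find-and-reslice while loop by materialising the list of all
-- slash positions once and computing the cut point arithmetically (alternative, same cost).

-- ===== PORT A =====
-- A's while loop: counter runs 0..9; each step finds the first '/' and reslices past it.
def eraseLoopA (string : String) (counter : Nat) : String :=
  if _h : counter < 10 then
    let index := PySem.Str.find string "/"
    if index = -1 then string
    else eraseLoopA (PySem.Str.slice string (some (index + 1)) none) (counter + 1)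
  else string
termination_by 10 - counter

def erase_slash_txt (string : String) : String :=
  PySem.Str.slice (eraseLoopA string 0) none (some (-4))

-- ===== PORT B =====
-- slashes = [i for i, c in enumerate(string) if c == '/'];
-- cut = slashes[min(len(slashes), 10) - 1] + 1 if slashes else 0; return string[cut:][:-4]
def erase_slash_txt_alt (string : String) : String :=
  let slashes : List Int :=
    ((PySem.List.enumerate string.toList 0).filter (fun p => p.2 == '/')).map (·.1)
  let cut : Int :=
    if slashes ≠ [] then
      PySem.List.pyGetD slashes (min (slashes.length : Int) 10 - 1) 0 + 1
    else 0
  PySem.Str.slice (PySem.Str.slice string (some cut) none) none (some (-4))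

-- ===== PRECONDITION & SPEC =====
def Spec_erase_slash_txt (string : String) (out : String) : Prop := out = erase_slash_txt_alt string
instance (string : String) (out : String) : Decidable (Spec_erase_slash_txt string out) := by unfold Spec_erase_slash_txt; infer_instance

-- ===== CLAIM (what is proved, stated in full; the proofs are below) =====
def Claim_equal_erase_slash_txt : Prop := ∀ (string : String), Dom_erase_slash_txt string → Spec_erase_slash_txt string (erase_slash_txt string)

-- ===== LEMMAS AND PROOFS =====

-- The (increasing) list of slash positions of l.
def sp : List Char → List Nat
  | [] => []
  | c :: r => if c = '/' then 0 :: (sp r).map (· + 1) else (sp r).map (· + 1)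

theorem mem_sp (l : List Char) (i : Nat) :
    i ∈ sp l ↔ ∃ h : i < l.length, l[i] = '/' := by
  induction l generalizing i with
  | nil => simp [sp]
  | cons c r ih =>
    simp only [sp]
    by_cases hc : c = '/'
    · subst hc
      rw [if_pos rfl]
      cases i with
      | zero => simp
      | succ j =>
        simp only [List.mem_cons, List.mem_map]
        constructor
        · rintro (h | ⟨n, hn, hnj⟩)
          · omega
          · have hj : n = j := by omega
            subst hj
            obtain ⟨hlt, hget⟩ := (ih n).mp hn
            exact ⟨by simpa using hlt, by simpa using hget⟩
        · rintro ⟨hlt, hget⟩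
          refine Or.inr ⟨j, (ih j).mpr ⟨by simpa using hlt, by simpa using hget⟩, rfl⟩
    · rw [if_neg hc]
      cases i with
      | zero =>
        simp only [List.mem_map]
        constructor
        · rintro ⟨n, _, h⟩; omega
        · rintro ⟨_, hget⟩; exact absurd (by simpa using hget) hc
      | succ j =>
        simp only [List.mem_map]
        constructor
        · rintro ⟨n, hn, hn1⟩
          have hj : n = j := by omega
          subst hj
          obtain ⟨hlt, hget⟩ := (ih n).mp hn
          exact ⟨by simpa using hlt, by simpa using hget⟩
        · rintro ⟨hlt, hget⟩
          exact ⟨j, (ih j).mpr ⟨by simpa using hlt, by simpa using hget⟩, rfl⟩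

theorem sp_pairwise (l : List Char) : (sp l).Pairwise (· < ·) := by
  induction l with
  | nil => simp [sp]
  | cons c r ih =>
    have hmap : ((sp r).map (· + 1)).Pairwise (· < ·) := by
      rw [List.pairwise_map]
      exact ih.imp (by omega)
    simp only [sp]
    split
    · exact List.Pairwise.cons (by simp) hmap
    · exact hmap

theorem sp_eq_nil_iff (l : List Char) : sp l = [] ↔ '/' ∉ l := by
  rw [List.eq_nil_iff_forall_not_mem]
  constructor
  · intro h hmem
    obtain ⟨i, hi, hget⟩ := List.mem_iff_getElem.mp hmem
    exact h i ((mem_sp l i).mpr ⟨hi, hget⟩)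
  · intro h i hi
    obtain ⟨hlt, hget⟩ := (mem_sp l i).mp hi
    exact h (hget ▸ List.getElem_mem hlt)

theorem slash_prefix_drop (l : List Char) (i : Nat) :
    (['/'] <+: l.drop i) ↔ ∃ h : i < l.length, l[i] = '/' := by
  constructor
  · rintro ⟨t, ht⟩
    have hlen : i < l.length := by
      have := congrArg List.length ht
      simp [List.length_drop] at this
      omega
    refine ⟨hlen, ?_⟩
    have : (l.drop i)[0]? = some '/' := by rw [← ht]; simp
    simpa [List.getElem?_drop, List.getElem?_eq_getElem hlen] using this
  · rintro ⟨hlt, hget⟩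
    have h0 : (l.drop i)[0]? = some '/' := by
      simpa [List.getElem?_drop, List.getElem?_eq_getElem hlt] using congrArg some hget
    cases hd : l.drop i with
    | nil => rw [hd] at h0; simp at h0
    | cons x t =>
      rw [hd] at h0
      simp at h0
      exact ⟨t, by simp [h0]⟩

theorem find_sp_nil (l : List Char) (h : sp l = []) : PySem.Chars.find l ['/'] = -1 := by
  rw [PySem.Chars.find_eq_neg_one_iff]
  intro hinf
  have hmem : '/' ∈ l := hinf.mem (by simp)
  exact (sp_eq_nil_iff l).mp h hmem

theorem find_sp_head (l : List Char) (a : Nat) (t : List Nat) (h : sp l = a :: t) :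
    PySem.Chars.find l ['/'] = (a : Int) := by
  have ha : a ∈ sp l := by rw [h]; exact List.mem_cons_self
  obtain ⟨hlt, hget⟩ := (mem_sp l a).mp ha
  have hinf : ['/'] <:+: l :=
    ((slash_prefix_drop l a).mpr ⟨hlt, hget⟩).isInfix.trans (List.drop_suffix a l).isInfix
  have hne : PySem.Chars.find l ['/'] ≠ -1 := (PySem.Chars.find_ne_neg_one_iff l ['/']).mpr hinf
  have hge : 0 ≤ PySem.Chars.find l ['/'] := by
    have := PySem.Chars.neg_one_le_find (s := l) (sub := ['/'])
    omega
  obtain ⟨hpre, hmin⟩ := PySem.Chars.find_spec (s := l) (sub := ['/']) hge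
  have hfmem : (PySem.Chars.find l ['/']).toNat ∈ sp l := by
    obtain ⟨h1, h2⟩ := (slash_prefix_drop l _).mp hpre
    exact (mem_sp l _).mpr ⟨h1, h2⟩
  have hle : a ≤ (PySem.Chars.find l ['/']).toNat := by
    have hpw := List.pairwise_iff_getElem.mp (sp_pairwise l)
    obtain ⟨j, hj, hjval⟩ := List.mem_iff_getElem.mp hfmem
    have h0 : (sp l)[0]'(by rw [h]; simp) = a := by simp [h]
    rcases Nat.eq_zero_or_pos j with rfl | hjpos
    · omega
    · have := hpw 0 j (by omega) hj hjpos
      omega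
  have hnotlt : ¬ a < (PySem.Chars.find l ['/']).toNat := by
    intro hlt2
    exact hmin a hlt2 ((slash_prefix_drop l a).mpr ⟨hlt, hget⟩)
  omega

theorem sp_drop (l : List Char) : ∀ (a : Nat) (t : List Nat), sp l = a :: t →
    sp (l.drop (a + 1)) = t.map (· - (a + 1)) := by
  induction l with
  | nil => intro a t h; simp [sp] at h
  | cons c r ih =>
    intro a t h
    by_cases hc : c = '/'
    · subst hc
      have hsp : sp ('/' :: r) = 0 :: (sp r).map (· + 1) := by simp [sp]
      rw [hsp] at h
      obtain ⟨rfl, rfl⟩ : a = 0 ∧ t = (sp r).map (· + 1) := by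
        constructor <;> [exact (List.cons.injEq .. ▸ h).1.symm; exact (List.cons.injEq .. ▸ h).2.symm]
      simp only [List.drop_succ_cons, List.drop_zero, List.map_map]
      have hfun : ((· - 1) ∘ (· + 1) : Nat → Nat) = id := by funext n; simp
      rw [hfun, List.map_id]
    · have hsp : sp (c :: r) = (sp r).map (· + 1) := by simp [sp, hc]
      rw [hsp] at h
      cases hx : sp r with
      | nil => rw [hx] at h; simp at h
      | cons a0 t0 =>
        rw [hx] at h
        simp only [List.map_cons] at h
        obtain ⟨rfl, rfl⟩ : a = a0 + 1 ∧ t = t0.map (· + 1) := by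
          exact ⟨(List.cons.injEq .. ▸ h).1.symm, (List.cons.injEq .. ▸ h).2.symm⟩
        have hdrop : (c :: r).drop (a0 + 1 + 1) = r.drop (a0 + 1) := by simp
        rw [hdrop, ih a0 t0 hx, List.map_map]
        apply List.map_congr_left
        intro n _
        simp only [Function.comp_apply]
        omega

-- A\'s loop characterised as repeated stripping past the first slash.
def stripN : Nat → List Char → List Char
  | 0, l => l
  | m+1, l =>
    let i := PySem.Chars.find l ['/']
    if i = -1 then l else stripN m (l.drop (i.toNat + 1))

-- The cut point B computes: one past the min(count, m)-th slash.
def cutN (l : List Char) (m : Nat) : Nat :=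
  if sp l = [] then 0 else (sp l).getD (min (sp l).length m - 1) 0 + 1

theorem stripN_cut : ∀ (m : Nat) (l : List Char), stripN (m + 1) l = l.drop (cutN l (m + 1)) := by
  intro m
  induction m with
  | zero =>
    intro l
    cases hsp : sp l with
    | nil => simp [stripN, find_sp_nil l hsp, cutN, hsp]
    | cons a t =>
      have hfind := find_sp_head l a t hsp
      simp only [stripN, hfind, cutN, hsp]
      rw [if_neg (by simp), if_neg (by simp)]
      have hidx : min (a :: t).length 1 - 1 = 0 := by simp
      rw [hidx]
      simp
  | succ m ih =>
    intro l
    cases hsp : sp l with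
    | nil => simp [stripN, find_sp_nil l hsp, cutN, hsp]
    | cons a t =>
      have hfind := find_sp_head l a t hsp
      rw [stripN, show PySem.Chars.find l ['/'] = (a : Int) from hfind]
      rw [if_neg (by simp)]
      have htoNat : ((a : Int)).toNat = a := by simp
      rw [htoNat, ih (l.drop (a + 1)), List.drop_drop]
      congr 1
      have hsp' := sp_drop l a t hsp
      cases ht : t with
      | nil =>
        rw [ht] at hsp'
        simp only [List.map_nil] at hsp'
        have h1 : cutN (List.drop (a + 1) l) (m + 1) = 0 := by simp [cutN, hsp']
        have h2 : cutN l (m + 1 + 1) = a + 1 := by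
          simp only [cutN, hsp, ht]
          rw [if_neg (by simp)]
          have hmin : min ([a] : List Nat).length (m + 1 + 1) - 1 = 0 := by simp
          rw [hmin]
          simp
        rw [h1, h2]
      | cons b tb =>
        have hne' : sp (l.drop (a + 1)) ≠ [] := by rw [hsp', ht]; simp
        rw [cutN, if_neg hne', hsp']
        rw [cutN, hsp, if_neg (by simp)]
        have hlt : t.length = tb.length + 1 := by rw [ht]; simp
        set j : Nat := min t.length (m + 1) - 1 with hj
        have hjlt : j < t.length := by omega
        have hlenmap : (t.map (· - (a + 1))).length = t.length := by simp
        have hidx : min ((t.map (· - (a + 1))).length) (m + 1) - 1 = j := by rw [hlenmap]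
        rw [hidx, List.getD_eq_getElem _ _ (by rw [hlenmap]; exact hjlt), List.getElem_map]
        have hidx2 : min (a :: t).length (m + 1 + 1) - 1 = j + 1 := by
          simp only [List.length_cons]
          omega
        rw [hidx2, List.getD_eq_getElem _ _ (by simp; omega)]
        have htget : (a :: t)[j + 1]'(by simp; omega) = t[j] := by simp
        rw [htget]
        -- ordering: a is the least slash position
        have hord : a + 1 ≤ t[j] := by
          have hpw := List.pairwise_iff_getElem.mp (sp_pairwise l)
          have := hpw 0 (j + 1) (by rw [hsp]; simp) (by rw [hsp]; simp; omega) (by omega)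
          have h0 : (sp l)[0]'(by rw [hsp]; simp) = a := by simp [hsp]
          have h1 : (sp l)[j + 1]'(by rw [hsp]; simp; omega) = t[j] := by simp [hsp]
          omega
        omega

theorem loopA_eq (n : Nat) : ∀ (k : Nat), k + n = 10 → ∀ (s : String),
    (eraseLoopA s k).toList = stripN n s.toList := by
  induction n with
  | zero =>
    intro k hk s
    rw [eraseLoopA]
    simp [show ¬(k < 10) by omega, stripN]
  | succ n ih =>
    intro k hk s
    rw [eraseLoopA]
    rw [dif_pos (show k < 10 by omega)]
    simp only [PySem.Str.find_eq]
    have hsub : ("/" : String).toList = ['/'] := rfl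
    by_cases hf : PySem.Chars.find s.toList ['/'] = -1
    · rw [hsub, if_pos hf]
      simp [stripN, hf]
    · rw [hsub, if_neg hf]
      have hge : 0 ≤ PySem.Chars.find s.toList ['/'] := by
        have := PySem.Chars.neg_one_le_find (s := s.toList) (sub := ['/'])
        omega
      have hslice : (PySem.Str.slice s (some (PySem.Chars.find s.toList ['/'] + 1)) none).toList =
          s.toList.drop ((PySem.Chars.find s.toList ['/']).toNat + 1) := by
        rw [PySem.Str.toList_slice, PySem.Chars.slice_eq_listSlice,
          PySem.List.slice_from _ (by omega : (0:Int) ≤ PySem.Chars.find s.toList ['/'] + 1)]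
        have : (PySem.Chars.find s.toList ['/'] + 1).toNat =
            (PySem.Chars.find s.toList ['/']).toNat + 1 := by omega
        rw [this]
      rw [ih (k + 1) (by omega), hslice]
      simp only [stripN, hf, if_false]

-- B\'s slash list is sp, shifted by the enumerate start.
theorem slashes_eq (l : List Char) : ∀ (s : Int),
    ((PySem.List.enumerate l s).filter (fun p => p.2 == '/')).map (·.1) =
      (sp l).map (fun (n : Nat) => (n : Int) + s) := by
  induction l with
  | nil => intro s; simp [PySem.List.enumerate_nil, sp]
  | cons c r ih =>
    intro s
    rw [PySem.List.enumerate_cons]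
    by_cases hc : c = '/'
    · subst hc
      have hsp : sp ('/' :: r) = 0 :: (sp r).map (· + 1) := by simp [sp]
      rw [hsp]
      simp only [List.filter_cons]
      rw [if_pos (by simp)]
      simp only [List.map_cons, ih (s + 1), List.map_map]
      congr 1
      · simp
      · apply List.map_congr_left
        intro n _
        simp only [Function.comp_apply]
        push_cast
        ring
    · simp only [List.filter_cons]
      rw [if_neg (by simpa using hc)]
      have hsp : sp (c :: r) = (sp r).map (· + 1) := by simp [sp, hc]
      rw [hsp, ih (s + 1), List.map_map]
      apply List.map_congr_left
      intro n _
      simp only [Function.comp_apply]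
      push_cast
      ring

-- B\'s inner slice drops exactly cutN 10 characters.
theorem alt_inner (s : String) :
    (PySem.Str.slice s (some (if (((PySem.List.enumerate s.toList 0).filter (fun p => p.2 == '/')).map (·.1)) ≠ [] then
      PySem.List.pyGetD (((PySem.List.enumerate s.toList 0).filter (fun p => p.2 == '/')).map (·.1)) (min ((((PySem.List.enumerate s.toList 0).filter (fun p => p.2 == '/')).map (·.1)).length : Int) 10 - 1) 0 + 1
    else 0)) none).toList = s.toList.drop (cutN s.toList 10) := by
  have hsl := slashes_eq s.toList 0
  cases hsp : sp s.toList with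
  | nil =>
    rw [hsp] at hsl
    simp only [List.map_nil] at hsl
    rw [if_neg (by rw [hsl]; simp)]
    rw [PySem.Str.toList_slice, PySem.Chars.slice_eq_listSlice,
      PySem.List.slice_from _ (by omega : (0:Int) ≤ 0)]
    simp [cutN, hsp]
  | cons a t =>
    rw [hsp] at hsl
    have hne : (((PySem.List.enumerate s.toList 0).filter (fun p => p.2 == '/')).map (·.1)) ≠ [] := by
      rw [hsl]; simp
    rw [if_pos hne]
    have hk : 1 ≤ (a :: t).length := by simp
    set ps : List Nat := a :: t with hps
    have hlen : ((((PySem.List.enumerate s.toList 0).filter (fun p => p.2 == '/')).map (·.1)).length) = ps.length := by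
      rw [hsl]; simp
    set jn : Nat := min ps.length 10 - 1 with hjn
    have hjlt : jn < ps.length := by
      simp only [hps, List.length_cons] at *
      omega
    have hidx : (min ((((PySem.List.enumerate s.toList 0).filter (fun p => p.2 == '/')).map (·.1)).length : Int) 10 - 1) = ((jn : Nat) : Int) := by
      rw [hlen, hjn]
      simp only [hps, List.length_cons]
      push_cast
      omega
    rw [hidx, PySem.List.pyGetD_natCast, hsl]
    have hgetD : ((ps.map (fun (n : Nat) => (n : Int) + 0)).getD jn 0) = ((ps[jn]'hjlt : Nat) : Int) := by
      rw [List.getD_eq_getElem _ _ (by simp; omega), List.getElem_map]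
      simp
    rw [hgetD]
    have hcast : ((ps[jn]'hjlt : Nat) : Int) + 1 = (((ps[jn]'hjlt + 1 : Nat)) : Int) := by push_cast; ring
    rw [hcast, PySem.Str.toList_slice, PySem.Chars.slice_eq_listSlice,
      PySem.List.slice_from _ (by positivity)]
    congr 1
    rw [Int.toNat_natCast]
    rw [cutN, hsp]
    rw [if_neg (by simp)]
    rw [List.getD_eq_getElem _ _ (by omega)]

-- ===== VERDICT (by name: the statement is the Claim_ definition above) =====
theorem erase_slash_txt_spec : Claim_equal_erase_slash_txt := by
  intro s _
  unfold Spec_erase_slash_txt erase_slash_txt erase_slash_txt_alt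
  have h1 := loopA_eq 10 0 rfl s
  have h2 := stripN_cut 9 s.toList
  have h3 := alt_inner s
  have hXY := String.toList_inj.mp ((h1.trans h2).trans h3.symm)
  exact congrArg (fun x => PySem.Str.slice x none (some (-4))) hXY
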